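-- pv_equiv track=rewrite | github.com/PlasmaControl/DESC | desc/objectives/find_sour_mpi_xy-bu.py | _factorize_2d
-- ===== SOURCE A (Python) =====
-- import math
--
-- def _factorize_2d(num_ranks):
--     """Choose P_M,P_N such that P_M * P_N = num_ranks and P_M <= P_N and close to sqrt."""
--     if num_ranks <= 1:
--         return 1, 1
--     P_M = int(math.floor(math.sqrt(num_ranks)))
--     while P_M > 1 and (num_ranks % P_M) != 0:
--         P_M -= 1
--     if num_ranks % P_M != 0:
--         P_M = 1
--     P_N = num_ranks // P_M
--     return int(P_M), int(P_N)
-- ===== SOURCE B (Python) =====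
-- import math
--
-- def _factorize_2d(num_ranks):
--     """Choose P_M,P_N such that P_M * P_N = num_ranks and P_M <= P_N and close to sqrt."""
--     if num_ranks <= 1:
--         return 1, 1
--     limit = int(math.floor(math.sqrt(num_ranks)))
--     best = 1
--     for i in range(1, limit + 1):
--         if num_ranks % i == 0:
--             best = i
--     P_M = best
--     P_N = num_ranks // P_M
--     return int(P_M), int(P_N)
-- ===== Notes on version B (the rewrite author's own statement) =====
-- stated objective: alternative
-- what changed: Replaces A's descending while-loop from floor(sqrt(n)) (stop at first divisor, with a P_M=1 fallback check) by an ascending for-loop over 1..floor(sqrt(n)) that keeps the largest divisor seen, needing no fallback.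
import Mathlib
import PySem

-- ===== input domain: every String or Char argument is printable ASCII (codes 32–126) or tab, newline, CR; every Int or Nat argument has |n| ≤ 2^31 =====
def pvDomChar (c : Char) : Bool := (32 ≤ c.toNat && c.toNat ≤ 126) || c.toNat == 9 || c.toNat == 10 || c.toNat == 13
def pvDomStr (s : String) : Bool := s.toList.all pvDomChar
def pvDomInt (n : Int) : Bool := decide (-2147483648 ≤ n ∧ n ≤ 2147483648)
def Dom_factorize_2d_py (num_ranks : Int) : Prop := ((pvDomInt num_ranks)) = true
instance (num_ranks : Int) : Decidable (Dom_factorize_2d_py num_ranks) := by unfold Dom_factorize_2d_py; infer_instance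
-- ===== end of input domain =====

-- B replaces A's descending divisor search (with its fallback check) by an ascending
-- sweep keeping the largest divisor ≤ floor(sqrt(n)); same cost, plainer loop ("alternative").

-- int(math.floor(math.sqrt(n))) for 2 ≤ n: exact as Nat.sqrt on the whole domain |n| ≤ 2^31
-- (double sqrt cannot cross an integer boundary for n that small).
def pvISqrt (n : Int) : Int := (Nat.sqrt n.toNat : Int)

-- ===== PORT A =====
-- while P_M > 1 and (num_ranks % P_M) != 0: P_M -= 1   (recursion on the Nat value of P_M)
def pvWhileA (n : Int) : Nat → Int
  | 0 => 0
  | 1 => 1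
  | p + 2 => if PySem.Int.mod n ((p : Int) + 2) ≠ 0 then pvWhileA n (p + 1) else (p : Int) + 2

def factorize_2d_py (num_ranks : Int) : Int × Int :=
  if num_ranks ≤ 1 then (1, 1)
  else
    let pm0 := pvISqrt num_ranks
    let pm1 := pvWhileA num_ranks pm0.toNat
    let pm := if PySem.Int.mod num_ranks pm1 ≠ 0 then 1 else pm1
    (pm, PySem.Int.floordiv num_ranks pm)

-- ===== PORT B =====
def factorize_2d_py_alt (num_ranks : Int) : Int × Int :=
  if num_ranks ≤ 1 then (1, 1)
  else
    let limit := pvISqrt num_ranks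
    let best := (PySem.List.pyRange 1 (limit + 1) 1).foldl
      (fun best i => if PySem.Int.mod num_ranks i = 0 then i else best) 1
    (best, PySem.Int.floordiv num_ranks best)

-- ===== PRECONDITION & SPEC =====
def Spec_factorize_2d_py (num_ranks : Int) (out : Int × Int) : Prop := out = factorize_2d_py_alt num_ranks
instance (num_ranks : Int) (out : Int × Int) : Decidable (Spec_factorize_2d_py num_ranks out) := by unfold Spec_factorize_2d_py; infer_instance

-- ===== CLAIM (what is proved, stated in full; the proofs are below) =====
def Claim_equal_factorize_2d_py : Prop := ∀ (num_ranks : Int), Dom_factorize_2d_py num_ranks → Spec_factorize_2d_py num_ranks (factorize_2d_py num_ranks)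

-- ===== LEMMAS AND PROOFS =====

-- the common value: the largest d ∈ [1, p] with n % d = 0 (1 when p = 0)
def pvMaxDiv (n : Int) : Nat → Int
  | 0 => 1
  | p + 1 => if PySem.Int.mod n ((p : Int) + 1) = 0 then (p : Int) + 1 else pvMaxDiv n p

theorem pvWhileA_eq_maxDiv (n : Int) (p : Nat) :
    pvWhileA n (p + 1) = pvMaxDiv n (p + 1) := by
  induction p with
  | zero =>
    simp [pvWhileA, pvMaxDiv]
  | succ p ih =>
    show pvWhileA n (p + 2) = pvMaxDiv n (p + 2)
    simp only [pvWhileA, pvMaxDiv, ih]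
    push_cast
    rw [show (p : Int) + 1 + 1 = (p : Int) + 2 from by ring]
    by_cases h : PySem.Int.mod n ((p : Int) + 2) = 0 <;> simp only [h, if_pos, if_neg, not_true, not_false_iff, ne_eq]

theorem pvFoldB_eq_maxDiv (n : Int) (p : Nat) :
    (PySem.List.pyRange 1 ((p : Int) + 1) 1).foldl
      (fun best i => if PySem.Int.mod n i = 0 then i else best) 1 = pvMaxDiv n p := by
  induction p with
  | zero => simp [pvMaxDiv]
  | succ p ih =>
    have hle : (1 : Int) ≤ (p : Int) + 1 := by omega
    have : ((p : Int) + 1 + 1) = (((p : Int) + 1) + 1) := by ring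
    rw [show (((p : Nat) + 1 : Nat) : Int) + 1 = ((p : Int) + 1) + 1 by push_cast; ring,
      PySem.List.pyRange_one_succ_right hle, List.foldl_append, ih]
    simp [pvMaxDiv]

theorem pvMaxDiv_dvd (n : Int) (p : Nat) : PySem.Int.mod n (pvMaxDiv n p) = 0 := by
  induction p with
  | zero =>
    rw [pvMaxDiv, PySem.Int.mod_eq_emod_of_pos one_pos]
    simp
  | succ p ih =>
    rw [pvMaxDiv]
    split
    · assumption
    · exact ih

-- ===== VERDICT (by name: the statement is the Claim_ definition above) =====
theorem factorize_2d_py_spec : Claim_equal_factorize_2d_py := by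
  intro n _
  unfold Spec_factorize_2d_py factorize_2d_py factorize_2d_py_alt
  by_cases h : n ≤ 1
  · simp [h]
  · simp only [if_neg h]
    have h2 : (2 : Nat) ≤ n.toNat := by omega
    have hs : 1 ≤ Nat.sqrt n.toNat := Nat.sqrt_pos.mpr (by omega)
    obtain ⟨s, hsq⟩ : ∃ s, Nat.sqrt n.toNat = s + 1 := ⟨Nat.sqrt n.toNat - 1, by omega⟩
    have htoNat : (pvISqrt n).toNat = s + 1 := by simp [pvISqrt, hsq]
    have hcast : pvISqrt n + 1 = ((s + 1 : Nat) : Int) + 1 := by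
      simp [pvISqrt, hsq]
    rw [htoNat, hcast, pvWhileA_eq_maxDiv, pvFoldB_eq_maxDiv,
      if_neg (by simpa using pvMaxDiv_dvd n (s + 1))]
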